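-- pv_equiv track=rewrite | github.com/xination/lvl_builder | xmgrace_plot.py | Cal_subgroups
-- ===== SOURCE A (Python) =====
-- def Cal_subgroups(overlap_range_list):
--     ''' we group the gammas with the same overlap xi-xf range
--     into a subgroup'''
--     subgroups = []
--     for i in range( len( overlap_range_list ) ):
--         temp_subgroup = []
--         idxa = overlap_range_list[i][0]
--         x_ia = overlap_range_list[i][1]
--         x_fa = overlap_range_list[i][2]
--         temp_subgroup.append( idxa )
--
--         # test with oter members
--         for j in range( len( overlap_range_list ) ):
--             idxb = overlap_range_list[j][0]
--             x_ib = overlap_range_list[j][1]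
--             x_fb = overlap_range_list[j][2]
--
--             # check both two end points i_______f
--             if i != j and ( x_ia == x_ib ) and (x_fa == x_fb) :
--                 temp_subgroup.append( idxb )
--                 pass
--
--             # check just start  point i_______  or end point _____f
--             # if i != j and ( ( x_ia == x_ib ) or ( x_fa == x_fb ) ):
--             #     temp_subgroup.append( idxb )
--             #     pass
--
--         # to sort the list.
--         temp_subgroup.sort( key= lambda x: x ) # f(x) = x
--
--         # we only want the cases with 2 or more
--         if ( len(temp_subgroup) > 1  and temp_subgroup not in subgroups ):
--             subgroups.append( temp_subgroup )
--     return subgroups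
--     pass
-- ===== SOURCE B (Python) =====
-- def Cal_subgroups(overlap_range_list):
--     ''' we group the gammas with the same overlap xi-xf range
--     into a subgroup'''
--     # one pass: bucket the idx values by their (x_i, x_f) range
--     groups = {}
--     for idx, x_i, x_f in overlap_range_list:
--         groups.setdefault((x_i, x_f), []).append(idx)
--     # emit each bucket of size >= 2 (first-appearance order), sorted, deduped
--     subgroups = []
--     for members in groups.values():
--         if len(members) >= 2:
--             g = sorted(members)
--             if g not in subgroups:
--                 subgroups.append(g)
--     return subgroups
-- ===== Notes on version B (the rewrite author's own statement) =====
-- stated objective: faster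
-- what changed: Replaces the all-pairs index scan (for every i, rescan the whole list for matching ranges, sort, dedup) with a single dict pass that buckets idx values by (x_i, x_f), then emits each bucket of size >= 2 sorted, deduping identical sorted lists in first-appearance order.
import Mathlib
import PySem

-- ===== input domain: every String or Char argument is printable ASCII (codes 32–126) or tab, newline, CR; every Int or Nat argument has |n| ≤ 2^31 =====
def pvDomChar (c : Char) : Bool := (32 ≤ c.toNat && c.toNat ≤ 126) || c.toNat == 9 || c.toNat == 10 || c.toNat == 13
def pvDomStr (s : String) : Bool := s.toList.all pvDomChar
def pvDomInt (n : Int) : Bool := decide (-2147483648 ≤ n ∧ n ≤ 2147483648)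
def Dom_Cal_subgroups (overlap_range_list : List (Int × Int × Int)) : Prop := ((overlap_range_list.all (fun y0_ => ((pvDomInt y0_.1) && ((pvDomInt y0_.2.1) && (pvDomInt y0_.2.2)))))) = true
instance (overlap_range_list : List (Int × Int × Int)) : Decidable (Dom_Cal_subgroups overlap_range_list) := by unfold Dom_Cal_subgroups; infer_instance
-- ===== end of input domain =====

-- B replaces A's all-pairs index scan with a one-pass dict bucketing by (x_i, x_f); measurably faster.


-- ===== PORT A =====
def Cal_subgroups (overlap_range_list : List (Int × Int × Int)) : List (List Int) :=
  (PySem.List.pyRange 0 (overlap_range_list.length : Int) 1).foldl (fun subgroups i =>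
    let ta := PySem.List.pyGetD overlap_range_list i (0, 0, 0)
    let idxa := ta.1
    let x_ia := ta.2.1
    let x_fa := ta.2.2
    let temp_subgroup : List Int := [idxa]
    let temp_subgroup :=
      (PySem.List.pyRange 0 (overlap_range_list.length : Int) 1).foldl (fun temp j =>
        let tb := PySem.List.pyGetD overlap_range_list j (0, 0, 0)
        if i ≠ j ∧ x_ia = tb.2.1 ∧ x_fa = tb.2.2 then temp ++ [tb.1] else temp) temp_subgroup
    let temp_subgroup := PySem.List.sorted temp_subgroup (fun x => x) false
    if temp_subgroup.length > 1 ∧ temp_subgroup ∉ subgroups then subgroups ++ [temp_subgroup]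
    else subgroups) []

-- ===== PORT B =====
def Cal_subgroups_alt (overlap_range_list : List (Int × Int × Int)) : List (List Int) :=
  let groups : PySem.Dict (Int × Int) (List Int) :=
    overlap_range_list.foldl
      (fun d t => d.modify (t.2.1, t.2.2) [] (fun ms => ms ++ [t.1])) PySem.Dict.empty
  groups.values.foldl (fun subgroups ms =>
    if ms.length ≥ 2 then
      let g := PySem.List.sorted ms (fun x => x) false
      if g ∈ subgroups then subgroups else subgroups ++ [g]
    else subgroups) []

-- ===== PRECONDITION & SPEC =====
def Spec_Cal_subgroups (overlap_range_list : List (Int × Int × Int)) (out : List (List Int)) : Prop := out = Cal_subgroups_alt overlap_range_list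
instance (overlap_range_list : List (Int × Int × Int)) (out : List (List Int)) : Decidable (Spec_Cal_subgroups overlap_range_list out) := by unfold Spec_Cal_subgroups; infer_instance

-- ===== CLAIM (what is proved, stated in full; the proofs are below) =====
def Claim_equal_Cal_subgroups : Prop := ∀ (overlap_range_list : List (Int × Int × Int)), Dom_Cal_subgroups overlap_range_list → Spec_Cal_subgroups overlap_range_list (Cal_subgroups overlap_range_list)

-- ===== LEMMAS AND PROOFS =====

-- the idx values whose (x_i, x_f) range equals k, in list order
def groupOf (l : List (Int × Int × Int)) (k : Int × Int) : List Int :=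
  (l.filter (fun t => (t.2.1, t.2.2) == k)).map (·.1)

-- the sorted bucket for range key k
def gkey (l : List (Int × Int × Int)) (k : Int × Int) : List Int :=
  PySem.List.sorted (groupOf l k) (fun x => x) false

-- the common step both programs reduce to: per range key k, append the sorted bucket if big and new
def stepK (l : List (Int × Int × Int)) (acc : List (List Int)) (k : Int × Int) : List (List Int) :=
  if 1 < (gkey l k).length ∧ gkey l k ∉ acc then acc ++ [gkey l k] else acc

theorem fst_ge_of_mem_enumerate {α : Type} (l : List α) (s : Int) (q : Int × α)
    (h : q ∈ PySem.List.enumerate l s) : s ≤ q.1 := by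
  rw [PySem.List.mem_enumerate_iff] at h
  obtain ⟨k, hk, rfl⟩ := h
  simp

theorem filtmap_enumerate (K : Int × Int) (l : List (Int × Int × Int)) :
    ∀ (s : Int),
    ((PySem.List.enumerate l s).filter (fun q => ((q.2.2.1, q.2.2.2) == K))).map (fun q => q.2.1)
      = (l.filter (fun t => (t.2.1, t.2.2) == K)).map (·.1) := by
  induction l with
  | nil => intro s; simp [PySem.List.enumerate]
  | cons x xs ih =>
    intro s
    rw [PySem.List.enumerate_cons]
    rcases Bool.eq_false_or_eq_true ((x.2.1, x.2.2) == K) with hC | hC <;>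
      simp [hC, ih (s + 1)]

theorem perm_aux (K : Int × Int) :
    ∀ (l : List (Int × Int × Int)) (s i : Int) (e : Int × Int × Int),
    (i, e) ∈ PySem.List.enumerate l s → ((e.2.1, e.2.2) == K) = true →
    (e.1 :: ((PySem.List.enumerate l s).filter
        (fun q => decide (i ≠ q.1) && ((q.2.2.1, q.2.2.2) == K))).map (fun q => q.2.1)).Perm
      (groupOf l K) := by
  intro l
  induction l with
  | nil => intro s i e h; simp [PySem.List.enumerate] at h
  | cons x xs ih =>
    intro s i e hmem hK
    unfold groupOf
    rw [PySem.List.enumerate_cons] at hmem ⊢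
    have htail : ∀ q ∈ PySem.List.enumerate xs (s + 1), s < q.1 := fun q hq => by
      have := fst_ge_of_mem_enumerate xs (s + 1) q hq; omega
    rw [List.filter_cons, List.filter_cons]
    rcases List.mem_cons.mp hmem with hhead | htl
    · -- i = s, e = x
      injection hhead with h1 h2
      obtain rfl : s = i := h1.symm
      obtain rfl : e = x := h2
      rw [if_neg (by simp), if_pos hK]
      have hcong : (PySem.List.enumerate xs (s + 1)).filter
            (fun q => decide (s ≠ q.1) && ((q.2.2.1, q.2.2.2) == K))
          = (PySem.List.enumerate xs (s + 1)).filter (fun q => ((q.2.2.1, q.2.2.2) == K)) :=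
        List.filter_congr (fun q hq => by have := htail q hq; simp; omega)
      rw [hcong, filtmap_enumerate K xs (s + 1)]
      exact List.Perm.refl _
    · -- (i, e) in the tail
      have hi : s < i := htail _ htl
      rcases Bool.eq_false_or_eq_true ((x.2.1, x.2.2) == K) with hCx | hCx
      · rw [if_pos (by simp [hCx]; omega), if_pos hCx]
        simp only [List.map_cons]
        exact (List.Perm.swap x.1 e.1 _).trans (List.Perm.cons x.1 (ih (s + 1) i e htl hK))
      · rw [if_neg (by simp [hCx]), if_neg (by simp [hCx])]
        exact ih (s + 1) i e htl hK

theorem stepK_mono (l : List (Int × Int × Int)) (acc : List (List Int)) (k : Int × Int)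
    (v : List Int) (h : v ∈ acc) : v ∈ stepK l acc k := by
  unfold stepK; split_ifs <;> simp [h]

theorem foldK_mem_mono (l : List (Int × Int × Int)) (xs : List (Int × Int)) :
    ∀ (init : List (List Int)) (v : List Int), v ∈ init → v ∈ xs.foldl (stepK l) init := by
  induction xs with
  | nil => intro init v h; simpa
  | cons x xs ih => intro init v h; exact ih _ _ (stepK_mono l init x v h)

theorem foldK_mem_of_mem (l : List (Int × Int × Int)) (xs : List (Int × Int)) :
    ∀ (init : List (List Int)) (k : Int × Int), k ∈ xs → 1 < (gkey l k).length →
    gkey l k ∈ xs.foldl (stepK l) init := by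
  induction xs with
  | nil => intro init k h _; simp at h
  | cons x xs ih =>
    intro init k hk hlen
    rcases List.mem_cons.mp hk with rfl | hk'
    · rw [List.foldl_cons]
      apply foldK_mem_mono
      unfold stepK
      split_ifs with h
      · simp
      · rcases not_and_or.mp h with h' | h'
        · exact absurd hlen h'
        · simpa using h'
    · exact ih _ _ hk' hlen

theorem stepK_noop (l : List (Int × Int × Int)) (acc : List (List Int)) (k : Int × Int)
    (h : 1 < (gkey l k).length → gkey l k ∈ acc) : stepK l acc k = acc := by
  unfold stepK; split_ifs with hc
  · exact absurd (h hc.1) hc.2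
  · rfl

theorem foldK_dedup (l : List (Int × Int × Int)) (xs : List (Int × Int))
    (init : List (List Int)) :
    xs.foldl (stepK l) init = (PySem.Set.ofList xs).foldl (stepK l) init := by
  induction xs using List.reverseRecOn with
  | nil => rfl
  | append_singleton ys x ih =>
    rw [List.foldl_append, PySem.Set.ofList_append_singleton]
    by_cases hx : x ∈ ys
    · rw [PySem.Set.add_of_mem ((PySem.Set.mem_ofList ys x).mpr hx), ← ih]
      simp only [List.foldl_cons, List.foldl_nil]
      exact stepK_noop l _ x (fun hlen => foldK_mem_of_mem l ys init x hx hlen)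
    · rw [PySem.Set.add_of_not_mem (fun hmem => hx ((PySem.Set.mem_ofList ys x).mp hmem)),
        List.foldl_append, ← ih]

theorem A_eq_enum (l : List (Int × Int × Int)) :
    Cal_subgroups l = (PySem.List.enumerate l 0).foldl (fun subgroups p =>
      let temp :=
        (PySem.List.enumerate l 0).foldl (fun temp q =>
          if p.1 ≠ q.1 ∧ p.2.2.1 = q.2.2.1 ∧ p.2.2.2 = q.2.2.2 then temp ++ [q.2.1]
          else temp) [p.2.1]
      let temp := PySem.List.sorted temp (fun x => x) false
      if temp.length > 1 ∧ temp ∉ subgroups then subgroups ++ [temp] else subgroups) [] := by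
  unfold Cal_subgroups
  rw [PySem.List.enumerate_eq_map_pyRange l (0, 0, 0)]
  simp only [List.foldl_map]
  rfl

theorem foldl_enumerate_snd {α β : Type} (l : List α) (g : β → α → β) :
    ∀ (s : Int) (init : β),
    (PySem.List.enumerate l s).foldl (fun acc p => g acc p.2) init = l.foldl g init := by
  induction l with
  | nil => intro s init; rfl
  | cons x xs ih =>
    intro s init
    rw [PySem.List.enumerate_cons, List.foldl_cons, List.foldl_cons, ih (s + 1)]

theorem A_eq_foldK (l : List (Int × Int × Int)) :
    Cal_subgroups l = (l.map (fun t => (t.2.1, t.2.2))).foldl (stepK l) [] := by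
  rw [A_eq_enum]
  rw [List.foldl_map, ← foldl_enumerate_snd l (fun acc t => stepK l acc (t.2.1, t.2.2)) 0 []]
  apply PySem.List.foldl_congr_mem
  intro acc p hp
  have hmem' : (p.1, p.2) ∈ PySem.List.enumerate l 0 := by simpa using hp
  have hinner : (PySem.List.enumerate l 0).foldl (fun temp q =>
        if p.1 ≠ q.1 ∧ p.2.2.1 = q.2.2.1 ∧ p.2.2.2 = q.2.2.2 then temp ++ [q.2.1]
        else temp) [p.2.1]
      = [p.2.1] ++ ((PySem.List.enumerate l 0).filter
          (fun q => decide (p.1 ≠ q.1) && ((q.2.2.1, q.2.2.2) == (p.2.2.1, p.2.2.2)))).map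
          (fun q => q.2.1) := by
    rw [← PySem.List.foldl_append_if
      (fun q => decide (p.1 ≠ q.1) && ((q.2.2.1, q.2.2.2) == (p.2.2.1, p.2.2.2)))
      (fun q => q.2.1) (PySem.List.enumerate l 0) [p.2.1]]
    apply PySem.List.foldl_congr_mem
    intro temp q _
    apply if_congr _ rfl rfl
    constructor
    · rintro ⟨h1, h2, h3⟩
      simp [h1, h2.symm, h3.symm]
    · intro h
      simp only [Bool.and_eq_true, decide_eq_true_eq, beq_iff_eq, Prod.mk.injEq] at h
      exact ⟨h.1, h.2.1.symm, h.2.2.symm⟩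
  simp only [hinner, List.singleton_append]
  have hperm := perm_aux (p.2.2.1, p.2.2.2) l 0 p.1 p.2 hmem' (by simp)
  have hsorted := PySem.List.sorted_eq_sorted_of_perm _ _ (fun x : Int => x)
    (fun a b h => h) hperm
  simp only [hsorted]
  rfl

-- the dict built by B's first pass
def bgroups (l : List (Int × Int × Int)) : PySem.Dict (Int × Int) (List Int) :=
  l.foldl (fun d t => d.modify (t.2.1, t.2.2) [] (fun ms => ms ++ [t.1])) PySem.Dict.empty

theorem B_eq_foldK (l : List (Int × Int × Int)) :
    Cal_subgroups_alt l
      = (PySem.Set.ofList (l.map (fun t => (t.2.1, t.2.2)))).foldl (stepK l) [] := by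
  have hkeys : (bgroups l).keys = PySem.Set.ofList (l.map (fun t => (t.2.1, t.2.2))) := by
    unfold bgroups
    rw [PySem.Dict.keys_foldl_modify_key l (fun t => (t.2.1, t.2.2)) []
      (fun _ t => fun ms => ms ++ [t.1]) PySem.Dict.empty]
    rw [show (PySem.Dict.empty : PySem.Dict (Int × Int) (List Int)).keys
        = PySem.Set.empty from rfl, PySem.Set.update_empty]
  have hnodup : (bgroups l).keys.Nodup := by
    unfold bgroups
    exact PySem.Dict.nodup_keys_foldl_modify_key l (fun t => (t.2.1, t.2.2)) []
      (fun _ t => fun ms => ms ++ [t.1]) PySem.Dict.empty (by simp [PySem.Dict.keys_empty])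
  have hgetD : ∀ k, (bgroups l).getD k [] = groupOf l k := by
    intro k
    have key0 := PySem.Dict.getD_foldl_modify_append
      (l.map (fun t => ((t.2.1, t.2.2), t.1))) (PySem.Dict.empty (κ := Int × Int)) k
    rw [List.foldl_map] at key0
    refine Eq.trans (key0.trans ?_)  rfl
    simp [groupOf, List.filter_map, Function.comp_def]
  have hB : Cal_subgroups_alt l = (bgroups l).values.foldl (fun subgroups ms =>
      if ms.length ≥ 2 then
        let g := PySem.List.sorted ms (fun x => x) false
        if g ∈ subgroups then subgroups else subgroups ++ [g]
      else subgroups) [] := rfl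
  rw [hB, PySem.Dict.values_eq_map_keys (bgroups l) hnodup [],
    List.map_congr_left (fun k _ => hgetD k), List.foldl_map, hkeys]
  apply PySem.List.foldl_congr_mem
  intro acc k _
  have hlen : (PySem.List.sorted (groupOf l k) (fun x => x) false).length
      = (groupOf l k).length := PySem.List.length_sorted _ _ _
  unfold stepK gkey
  by_cases hL : 1 < (groupOf l k).length
  · by_cases hM : (PySem.List.sorted (groupOf l k) (fun x => x) false) ∈ acc
    · rw [if_pos (show (groupOf l k).length ≥ 2 by omega), if_pos hM,
        if_neg (fun hc => hc.2 hM)]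
    · rw [if_pos (show (groupOf l k).length ≥ 2 by omega), if_neg hM,
        if_pos ⟨by rw [hlen]; exact hL, hM⟩]
  · rw [if_neg (show ¬((groupOf l k).length ≥ 2) by omega),
      if_neg (fun hc => hL (by rw [hlen] at hc; exact hc.1))]

-- ===== VERDICT (by name: the statement is the Claim_ definition above) =====
theorem Cal_subgroups_spec : Claim_equal_Cal_subgroups := by
  intro l _
  unfold Spec_Cal_subgroups
  rw [A_eq_foldK, B_eq_foldK, foldK_dedup]
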